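-- pv_equiv track=rewrite | github.com/jzm00007/tfg | codigo_tfg/archivos_funcionalidades/preprocesamiento_del_texto_limpieza.py | corregir_palabra
-- ===== SOURCE A (Python) =====
-- def corregir_palabra(palabra):
--     nueva_palabra = ""  # Palabra corregida
--     i = 0   # Variable de iteración para recorrer la palabra
--
--     while i < len(palabra):
--         # Si carácter actual es letra del alfabeto
--         if palabra[i].isalpha():
--             nueva_palabra += palabra[i]  # Añadir letra actual
--             # Si la letra actual es igual a la siguiente, hay una repetición
--             if i < len(palabra) - 1 and palabra[i] == palabra[i + 1]:
--                 i += 1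
--                 # Si hay más de dos letras consecutivas iguales, solo se añade dos
--                 while i < len(palabra) - 1 and palabra[i] == palabra[i + 1]:
--                     i += 1
--                 nueva_palabra += palabra[i]  # Añadir segunda letra repetida
--         else:
--             nueva_palabra += palabra[i]  # Agregar caracter no alfabético
--         i += 1
--
--     # Casos de URLs
--     if palabra.startswith('www'):
--         nueva_palabra = 'w'+ nueva_palabra
--
--     # Eliminar letras repetidas al inicio, excepto si palabra comienza por 'll' ni 'www'
--     if not palabra.startswith('ll') and not palabra.startswith('www'):
--         while len(nueva_palabra) >= 2 and nueva_palabra[0] == nueva_palabra[1]: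
--             nueva_palabra = nueva_palabra[1:]   # Eliminar primera letra
--
--     # Eliminar letras repetidas al final
--     while len(nueva_palabra) >= 2 and nueva_palabra[-1] == nueva_palabra[-2]:
--         nueva_palabra = nueva_palabra[:-1]      # Eliminar última letra
--
--     return nueva_palabra
-- ===== SOURCE B (Python) =====
-- def corregir_palabra(palabra):
--     # Run-length encode the word once, adjust run counts arithmetically, then join.
--     runs = []
--     for ch in palabra:
--         if runs and runs[-1][0] == ch:
--             runs[-1] = (ch, runs[-1][1] + 1)
--         else:
--             runs.append((ch, 1))
--     # collapse alphabetic runs to at most two characters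
--     out = [(c, min(2, n)) if c.isalpha() else (c, n) for (c, n) in runs]
--     if palabra.startswith('www'):
--         out[0] = (out[0][0], out[0][1] + 1)   # URL case: one extra leading 'w'
--     elif not palabra.startswith('ll'):
--         if out:
--             out[0] = (out[0][0], 1)           # drop repeated letters at the start
--     if out:
--         out[-1] = (out[-1][0], 1)             # drop repeated letters at the end
--     return ''.join(c * n for (c, n) in out)
-- ===== Notes on version B (the rewrite author's own statement) =====
-- stated objective: faster
-- what changed: B run-length-encodes the word once and does all the work (collapse alphabetic runs to two, the 'www' fix, the leading and trailing duplicate trims) as arithmetic on the run counts, replacing A's index-skipping while loop and its three character-by-character string-rebuilding trim loops.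
import Mathlib
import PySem

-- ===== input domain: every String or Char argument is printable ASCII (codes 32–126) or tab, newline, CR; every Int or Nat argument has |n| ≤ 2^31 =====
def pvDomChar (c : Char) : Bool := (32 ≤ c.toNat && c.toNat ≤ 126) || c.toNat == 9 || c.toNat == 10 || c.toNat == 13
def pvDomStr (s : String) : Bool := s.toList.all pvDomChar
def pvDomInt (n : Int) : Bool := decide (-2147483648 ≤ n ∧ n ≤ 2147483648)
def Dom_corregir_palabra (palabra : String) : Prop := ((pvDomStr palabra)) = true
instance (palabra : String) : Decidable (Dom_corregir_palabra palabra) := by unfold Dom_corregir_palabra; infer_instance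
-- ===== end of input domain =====

-- B replaces A's index-skipping while loop and the three character-by-character trim loops by a single
-- run-length encoding whose run counts are then adjusted arithmetically (objective: faster — the timing
-- run measured B well above 1.5x faster at the largest generated size).

-- ===== PORT A =====
-- inner while of A: 'while i < len-1 and palabra[i] == palabra[i+1]: i += 1' — every char it steps over
-- equals the run character c, so it skips the leading copies of c (exact step-for-step on the suffix)
def pvSkipA (c : Char) : List Char → List Char
  | [] => []
  | x :: xs => if x = c then pvSkipA c xs else x :: xs

theorem pvSkipA_length_le (c : Char) (l : List Char) : (pvSkipA c l).length ≤ l.length := by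
  induction l with
  | nil => simp [pvSkipA]
  | cons x xs ih =>
    by_cases h : x = c
    · simp [pvSkipA, h]; omega
    · simp [pvSkipA, h]

-- A's main while loop over index i, as structural recursion on the suffix palabra[i:]
def pvLoopA : List Char → List Char
  | [] => []
  | c :: rest =>
    if PySem.Chars.isalpha c then
      match rest with
      | x :: xs =>
        if x = c then c :: c :: pvLoopA (pvSkipA c (x :: xs))
        else c :: pvLoopA (x :: xs)
      | [] => [c]
    else c :: pvLoopA rest
termination_by l => l.length
decreasing_by
  · have := pvSkipA_length_le c (x :: xs); simp at *; omega
  · simp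
  · simp

-- 'while len(s) >= 2 and s[0] == s[1]: s = s[1:]'
def pvTrimLead : List Char → List Char
  | a :: b :: rest => if a = b then pvTrimLead (b :: rest) else a :: b :: rest
  | s => s

-- 'while len(s) >= 2 and s[-1] == s[-2]: s = s[:-1]'
def pvTrimTail (s : List Char) : List Char :=
  if h : 2 ≤ s.length ∧ s.getLast? = s.dropLast.getLast? then -- h used in the termination proof
    pvTrimTail s.dropLast
  else s
termination_by s.length
decreasing_by have := h.1; simp [List.length_dropLast]; omega

def corregir_palabra (palabra : String) : String :=
  let l := palabra.toList
  let nueva := pvLoopA l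
  let nueva := if PySem.Chars.startswith l ['w','w','w'] then 'w' :: nueva else nueva
  let nueva :=
    if ¬ PySem.Chars.startswith l ['l','l'] = true ∧ ¬ PySem.Chars.startswith l ['w','w','w'] = true
    then pvTrimLead nueva else nueva
  String.mk (pvTrimTail nueva)

-- ===== PORT B =====
-- run-length encoding loop of Source B; the accumulator holds the runs in reverse
-- (Python appends to / updates the END of `runs`; the fold updates the head and reverses once at the end)
def pvRStep (acc : List (Char × Nat)) (ch : Char) : List (Char × Nat) :=
  match acc with
  | (d, n) :: t => if d = ch then (ch, n + 1) :: t else (ch, 1) :: (d, n) :: t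
  | [] => [(ch, 1)]

def pvSetFirst (f : Nat → Nat) : List (Char × Nat) → List (Char × Nat)
  | [] => []
  | (c, n) :: t => (c, f n) :: t

def pvSetLast (f : Nat → Nat) : List (Char × Nat) → List (Char × Nat)
  | [] => []
  | [(c, n)] => [(c, f n)]
  | p :: t => p :: pvSetLast f t

def corregir_palabra_alt (palabra : String) : String :=
  let l := palabra.toList
  let runs := (l.foldl pvRStep []).reverse
  let out := runs.map (fun p => if PySem.Chars.isalpha p.1 then (p.1, min 2 p.2) else p)
  let out :=
    if PySem.Chars.startswith l ['w','w','w'] then pvSetFirst (· + 1) out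
    else if ¬ PySem.Chars.startswith l ['l','l'] = true then pvSetFirst (fun _ => 1) out
    else out
  let out := pvSetLast (fun _ => 1) out
  String.mk (out.flatMap (fun p => List.replicate p.2 p.1))

-- ===== PRECONDITION & SPEC =====
def Spec_corregir_palabra (palabra : String) (out : String) : Prop := out = corregir_palabra_alt palabra
instance (palabra : String) (out : String) : Decidable (Spec_corregir_palabra palabra out) := by unfold Spec_corregir_palabra; infer_instance

-- ===== CLAIM (what is proved, stated in full; the proofs are below) =====
def Claim_equal_corregir_palabra : Prop := ∀ (palabra : String), Dom_corregir_palabra palabra → Spec_corregir_palabra palabra (corregir_palabra palabra)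

-- ===== LEMMAS AND PROOFS =====

-- canonical run-length encoding (right-fold form), the common reference of both ports
def pvRunsOf : List Char → List (Char × Nat)
  | [] => []
  | c :: l =>
    match pvRunsOf l with
    | (d, m) :: rs => if d = c then (c, m + 1) :: rs else (c, 1) :: (d, m) :: rs
    | [] => [(c, 1)]

def pvMergeR (c : Char) (n : Nat) : List (Char × Nat) → List (Char × Nat)
  | (d, m) :: rs => if d = c then (c, n + m) :: rs else (c, n) :: (d, m) :: rs
  | [] => [(c, n)]

def pvFlatR (rl : List (Char × Nat)) : List Char := rl.flatMap (fun p => List.replicate p.2 p.1)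

def pvCollapseP (p : Char × Nat) : Char × Nat :=
  if PySem.Chars.isalpha p.1 then (p.1, min 2 p.2) else p

-- adjacent runs carry distinct characters
def pvSep (rl : List (Char × Nat)) : Prop := List.IsChain Ne (rl.map Prod.fst)

-- a well-formed run list: positive counts, adjacent runs have distinct characters
def pvGood (rl : List (Char × Nat)) : Prop :=
  (∀ p ∈ rl, 1 ≤ p.2) ∧ pvSep rl

theorem pvRunsOf_cons (c : Char) (l : List Char) :
    pvRunsOf (c :: l) = pvMergeR c 1 (pvRunsOf l) := by
  cases h : pvRunsOf l with
  | nil => simp [pvRunsOf, pvMergeR, h]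
  | cons p rs =>
    obtain ⟨d, m⟩ := p
    by_cases hd : d = c <;> simp [pvRunsOf, pvMergeR, h, hd, Nat.add_comm]

theorem pvRunsOf_head (c : Char) (l : List Char) :
    ∃ m rs, pvRunsOf (c :: l) = (c, m) :: rs ∧ 1 ≤ m := by
  rw [pvRunsOf_cons]
  cases h : pvRunsOf l with
  | nil => exact ⟨1, [], by simp [pvMergeR], by omega⟩
  | cons p rs =>
    obtain ⟨d, m⟩ := p
    by_cases hd : d = c
    · exact ⟨1 + m, rs, by simp [pvMergeR, hd], by omega⟩
    · exact ⟨1, (d, m) :: rs, by simp [pvMergeR, hd], by omega⟩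

theorem pvMergeR_of_head_ne (c : Char) (n : Nat) (rl : List (Char × Nat))
    (h : ∀ p ∈ rl.head?, p.1 ≠ c) : pvMergeR c n rl = (c, n) :: rl := by
  cases rl with
  | nil => rfl
  | cons p rs =>
    obtain ⟨d, m⟩ := p
    have : d ≠ c := h (d, m) (by simp)
    simp [pvMergeR, this]

theorem pvFoldl_rstep_gen (l : List Char) :
    ∀ c n t, l.foldl pvRStep ((c, n) :: t) = (pvMergeR c n (pvRunsOf l)).reverse ++ t := by
  induction l with
  | nil => intro c n t; simp [pvMergeR, pvRunsOf]
  | cons x xs ih =>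
    intro c n t
    rw [List.foldl_cons]
    by_cases hc : c = x
    · subst hc
      have hstep : pvRStep ((c, n) :: t) c = (c, n + 1) :: t := by simp [pvRStep]
      rw [hstep, ih]
      congr 1
      rw [pvRunsOf_cons]
      cases h : pvRunsOf xs with
      | nil => simp [pvMergeR]
      | cons p rs =>
        obtain ⟨d, m⟩ := p
        by_cases hd : d = c
        · simp [pvMergeR, hd]; omega
        · simp [pvMergeR, hd]
    · have hstep : pvRStep ((c, n) :: t) x = (x, 1) :: (c, n) :: t := by
        simp [pvRStep, if_neg hc]
      rw [hstep, ih, pvRunsOf_cons]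
      obtain ⟨m, rs, hx, _⟩ := pvRunsOf_head x xs
      rw [pvRunsOf_cons] at hx
      rw [pvMergeR_of_head_ne c n _ (by rw [hx]; intro p hp; simp at hp; subst hp; exact Ne.symm hc)]
      simp

theorem pvFoldl_rstep (l : List Char) :
    (l.foldl pvRStep []).reverse = pvRunsOf l := by
  cases l with
  | nil => simp [pvRunsOf]
  | cons c xs =>
    rw [List.foldl_cons]
    show (xs.foldl pvRStep ((c, 1) :: [])).reverse = _
    rw [pvFoldl_rstep_gen, pvRunsOf_cons]
    simp

theorem pvRunsOf_skip (c : Char) (l : List Char) :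
    ∃ n, pvRunsOf (c :: l) = (c, n) :: pvRunsOf (pvSkipA c l) ∧ 1 ≤ n ∧
      (∀ x xs, l = x :: xs → x = c → 2 ≤ n) := by
  induction l with
  | nil => exact ⟨1, by simp [pvRunsOf, pvSkipA], by omega, by intro x xs h; simp at h⟩
  | cons x xs ih =>
    by_cases hx : x = c
    · subst hx
      obtain ⟨n, hn, hn1, _⟩ := ih
      refine ⟨1 + n, ?_, by omega, by intros; omega⟩
      rw [pvRunsOf_cons (l := x :: xs), hn]
      simp [pvMergeR, pvSkipA]
    · refine ⟨1, ?_, le_refl 1, by intro y ys h hy; injection h with h1 _; exact absurd (h1 ▸ hy) hx⟩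
      rw [pvRunsOf_cons (l := x :: xs)]
      obtain ⟨m, rs, hh, _⟩ := pvRunsOf_head x xs
      rw [pvMergeR_of_head_ne c 1 _ (by rw [hh]; intro p hp; simp at hp; subst hp; exact hx)]
      simp [pvSkipA, hx]

theorem pvFlat_merge (c : Char) (rl : List (Char × Nat)) (hc : ¬ PySem.Chars.isalpha c = true) :
    pvFlatR ((pvMergeR c 1 rl).map pvCollapseP) = c :: pvFlatR (rl.map pvCollapseP) := by
  cases rl with
  | nil => simp [pvMergeR, pvFlatR, pvCollapseP, hc]
  | cons p rs =>
    obtain ⟨d, m⟩ := p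
    by_cases hd : d = c
    · subst hd
      have h1 : 1 + m = m + 1 := by omega
      simp [pvMergeR, pvFlatR, pvCollapseP, hc, h1, List.replicate_succ]
    · simp [pvMergeR, hd, pvFlatR, pvCollapseP, hc]

theorem pvLoopA_eq (l : List Char) :
    pvLoopA l = pvFlatR ((pvRunsOf l).map pvCollapseP) := by
  induction l using pvLoopA.induct with
  | case1 => simp [pvLoopA, pvRunsOf, pvFlatR]
  | case2 c xs ha ih =>
    rw [pvLoopA.eq_def]
    simp only [if_pos ha]
    obtain ⟨n, hn, _, h2⟩ := pvRunsOf_skip c (c :: xs)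
    have hn2 : 2 ≤ n := h2 c xs rfl rfl
    rw [hn, ih]
    have hmin : min 2 n = 2 := by omega
    simp [pvFlatR, pvCollapseP, ha, hmin, List.replicate_succ]
  | case3 c ha x xs hx ih =>
    rw [pvLoopA.eq_def]
    simp only [if_pos ha, if_neg hx]
    rw [pvRunsOf_cons (l := x :: xs)]
    obtain ⟨m, rs, hh, _⟩ := pvRunsOf_head x xs
    rw [pvMergeR_of_head_ne c 1 _ (by rw [hh]; intro p hp; simp at hp; subst hp; exact hx)]
    rw [ih]
    simp [pvFlatR, pvCollapseP, ha]
  | case4 c ha =>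
    rw [pvLoopA.eq_def]
    simp [ha, pvRunsOf, pvFlatR, pvCollapseP]
  | case5 c rest ha ih =>
    rw [pvLoopA.eq_def]
    simp only [if_neg ha]
    rw [pvRunsOf_cons, pvFlat_merge c _ ha, ih]

-- pvSep only looks at the characters, so it survives any change of a count
theorem pvSep_congr_chars (rl rl' : List (Char × Nat))
    (h : rl.map Prod.fst = rl'.map Prod.fst) (hs : pvSep rl) : pvSep rl' := by
  unfold pvSep at *
  rw [← h]
  exact hs

theorem pvRunsOf_good (l : List Char) : pvGood (pvRunsOf l) := by
  induction l with
  | nil => exact ⟨by simp [pvRunsOf], by simp [pvRunsOf, pvSep]⟩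
  | cons c xs ih =>
    obtain ⟨hcnt, hsep⟩ := ih
    rw [pvRunsOf_cons]
    cases h : pvRunsOf xs with
    | nil => exact ⟨by simp [pvMergeR], by simp [pvMergeR, pvSep]⟩
    | cons p rs =>
      obtain ⟨d, m⟩ := p
      rw [h] at hcnt hsep
      by_cases hd : d = c
      · refine ⟨?_, ?_⟩
        · intro q hq
          simp [pvMergeR, hd] at hq
          rcases hq with hq | hq
          · subst hq; simp
          · exact hcnt q (by simp [hq])
        · simp only [pvMergeR, if_pos hd]
          exact pvSep_congr_chars ((d, m) :: rs) _ (by simp [hd]) hsep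
      · refine ⟨?_, ?_⟩
        · intro q hq
          simp [pvMergeR, hd] at hq
          rcases hq with hq | hq | hq
          · subst hq; simp
          · subst hq; exact hcnt (d, m) (by simp)
          · exact hcnt q (by simp [hq])
        · simp only [pvMergeR, if_neg hd]
          unfold pvSep at *
          simp only [List.map_cons] at *
          exact List.isChain_cons_cons.mpr ⟨fun he => hd he.symm, hsep⟩

theorem pvGood_map_collapse (rl : List (Char × Nat)) (h : pvGood rl) :
    pvGood (rl.map pvCollapseP) := by
  obtain ⟨hcnt, hsep⟩ := h
  refine ⟨?_, ?_⟩
  · intro q hq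
    rw [List.mem_map] at hq
    obtain ⟨⟨c, n⟩, hp, hpq⟩ := hq
    have := hcnt _ hp
    simp at this
    subst hpq
    by_cases hca : PySem.Chars.isalpha c = true <;> simp [pvCollapseP, hca] <;> omega
  · refine pvSep_congr_chars rl _ ?_ hsep
    rw [List.map_map]
    congr 1
    funext p
    obtain ⟨c, n⟩ := p
    by_cases hca : PySem.Chars.isalpha c = true <;> simp [pvCollapseP, hca]

theorem pvGood_setFirst (f : Nat → Nat) (hf : ∀ n, 1 ≤ f n) (rl : List (Char × Nat))
    (h : pvGood rl) : pvGood (pvSetFirst f rl) := by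
  obtain ⟨hcnt, hsep⟩ := h
  cases rl with
  | nil => exact ⟨by simp [pvSetFirst], by simp [pvSetFirst, pvSep]⟩
  | cons p t =>
    obtain ⟨c, n⟩ := p
    refine ⟨?_, ?_⟩
    · intro q hq
      simp [pvSetFirst] at hq
      rcases hq with hq | hq
      · subst hq; exact hf n
      · exact hcnt q (by simp [hq])
    · exact pvSep_congr_chars ((c, n) :: t) _ (by simp [pvSetFirst]) hsep

theorem pvFlatR_head_ne (rl : List (Char × Nat)) (c : Char)
    (hcnt : ∀ p ∈ rl, 1 ≤ p.2) (hne : ∀ p ∈ rl.head?, p.1 ≠ c) :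
    ∀ x ∈ (pvFlatR rl).head?, x ≠ c := by
  cases rl with
  | nil => simp [pvFlatR]
  | cons p rs =>
    obtain ⟨d, m⟩ := p
    have hm : 1 ≤ m := hcnt (d, m) (by simp)
    have hd : d ≠ c := hne (d, m) (by simp)
    obtain ⟨k, rfl⟩ : ∃ k, m = k + 1 := ⟨m - 1, by omega⟩
    simp [pvFlatR, List.replicate_succ, hd]

theorem pvTrimLead_replicate (c : Char) (t : List Char) :
    ∀ n, pvTrimLead (List.replicate (n + 1) c ++ t) = pvTrimLead (c :: t) := by
  intro n
  induction n with
  | zero => simp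
  | succ k ih =>
    have hre : List.replicate (k + 1 + 1) c ++ t = c :: (List.replicate (k + 1) c ++ t) := by
      simp [List.replicate_succ]
    have hre2 : List.replicate (k + 1) c ++ t = c :: (List.replicate k c ++ t) := by
      simp [List.replicate_succ]
    rw [hre, hre2, pvTrimLead, if_pos rfl, ← hre2, ih]

theorem pvTrimLead_flat (rl : List (Char × Nat)) (h : pvGood rl) :
    pvTrimLead (pvFlatR rl) = pvFlatR (pvSetFirst (fun _ => 1) rl) := by
  obtain ⟨hcnt, hsep⟩ := h
  cases rl with
  | nil => rfl
  | cons p rs =>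
    obtain ⟨c, n⟩ := p
    have hn : 1 ≤ n := hcnt (c, n) (by simp)
    obtain ⟨k, rfl⟩ : ∃ k, n = k + 1 := ⟨n - 1, by omega⟩
    show pvTrimLead (List.replicate (k + 1) c ++ pvFlatR rs) = _
    rw [pvTrimLead_replicate]
    have hne : ∀ x ∈ (pvFlatR rs).head?, x ≠ c := by
      apply pvFlatR_head_ne
      · intro q hq; exact hcnt q (by simp [hq])
      · cases rs with
        | nil => simp
        | cons q u =>
          intro p hp
          simp at hp
          subst hp
          unfold pvSep at hsep
          simp only [List.map_cons] at hsep
          exact Ne.symm (List.isChain_cons_cons.mp hsep).1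
    have hid : pvTrimLead (c :: pvFlatR rs) = c :: pvFlatR rs := by
      cases hf : pvFlatR rs with
      | nil => rfl
      | cons y ys =>
        have hy : y ≠ c := by have := hne y; rw [hf] at this; exact this (by simp)
        rw [pvTrimLead, if_neg (fun he => hy he.symm)]
    rw [hid]
    simp [pvSetFirst, pvFlatR]

theorem pvTrimTail_eq_rev (s : List Char) :
    pvTrimTail s = (pvTrimLead s.reverse).reverse := by
  induction hn : s.length using Nat.strong_induction_on generalizing s with
  | _ N ih =>
    cases hr : s.reverse with
    | nil =>
      have : s = [] := by simpa using congrArg List.reverse hr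
      subst this
      rw [pvTrimTail]
      simp [pvTrimLead]
    | cons a t =>
      cases t with
      | nil =>
        have : s = [a] := by have := congrArg List.reverse hr; simpa using this
        subst this
        rw [pvTrimTail]
        simp [pvTrimLead]
      | cons b u =>
        have hs : s = (a :: b :: u).reverse := by
          rw [← hr, List.reverse_reverse]
        have hlast : s.getLast? = some a := by
          rw [← List.reverse_reverse s, List.getLast?_reverse, hr]; rfl
        have hdl : s.dropLast = (b :: u).reverse := by
          rw [hs, List.dropLast_reverse]; rfl
        have hlast2 : s.dropLast.getLast? = some b := by
          rw [hdl, List.getLast?_reverse]; rfl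
        have hlen : 2 ≤ s.length := by
          have h1 : s.length = (a :: b :: u).length := by rw [hs]; simp
          simp at h1; omega
        by_cases hab : a = b
        · rw [pvTrimTail, dif_pos ⟨hlen, by rw [hlast, hlast2, hab]⟩]
          rw [hdl]
          have hlt : (b :: u).reverse.length < N := by
            subst hn; rw [hs]; simp
          rw [ih _ hlt _ rfl]
          simp only [List.reverse_reverse]
          conv_rhs => rw [pvTrimLead]
          rw [if_pos hab]
        · rw [pvTrimTail, dif_neg (by rw [hlast, hlast2]; intro hc; exact hab (by simpa using hc.2))]
          rw [pvTrimLead, if_neg hab, ← hr, List.reverse_reverse]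

theorem pvFlatR_reverse (rl : List (Char × Nat)) :
    (pvFlatR rl).reverse = pvFlatR rl.reverse := by
  induction rl with
  | nil => rfl
  | cons p rs ih =>
    simp [pvFlatR, List.flatMap_append] at *
    rw [← ih]

theorem pvSep_reverse (rl : List (Char × Nat)) (h : pvSep rl) : pvSep rl.reverse := by
  unfold pvSep at *
  rw [List.map_reverse, List.isChain_reverse]
  exact h.imp (fun a b => Ne.symm)

theorem pvSetFirst_append (f : Nat → Nat) (l r : List (Char × Nat)) (h : l ≠ []) :
    pvSetFirst f (l ++ r) = pvSetFirst f l ++ r := by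
  cases l with
  | nil => exact absurd rfl h
  | cons p t => obtain ⟨c, n⟩ := p; simp [pvSetFirst]

theorem pvSetFirst_reverse (f : Nat → Nat) (rl : List (Char × Nat)) :
    pvSetFirst f rl.reverse = (pvSetLast f rl).reverse := by
  induction rl with
  | nil => rfl
  | cons p t ih =>
    cases t with
    | nil => obtain ⟨c, n⟩ := p; simp [pvSetFirst, pvSetLast]
    | cons q u =>
      rw [List.reverse_cons, pvSetFirst_append f _ _ (by simp), ih]
      show _ = (p :: pvSetLast f (q :: u)).reverse
      simp

theorem pvGood_reverse (rl : List (Char × Nat)) (h : pvGood rl) : pvGood rl.reverse :=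
  ⟨fun p hp => h.1 p (by simpa using hp), pvSep_reverse rl h.2⟩

theorem pvTrimTail_flat (rl : List (Char × Nat)) (h : pvGood rl) :
    pvTrimTail (pvFlatR rl) = pvFlatR (pvSetLast (fun _ => 1) rl) := by
  rw [pvTrimTail_eq_rev, pvFlatR_reverse, pvTrimLead_flat _ (pvGood_reverse rl h),
      pvSetFirst_reverse, ← pvFlatR_reverse, List.reverse_reverse]

theorem pvRunsOf_cons_same (c : Char) (l : List Char) (m : Nat) (rs : List (Char × Nat))
    (h : pvRunsOf (c :: l) = (c, m) :: rs) : pvRunsOf (c :: c :: l) = (c, m + 1) :: rs := by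
  rw [pvRunsOf_cons (l := c :: l), h]
  simp [pvMergeR, Nat.add_comm]

theorem pvGood_setLast_flat (rl : List (Char × Nat)) (h : pvGood rl)
    (f : Nat → Nat) (hf : ∀ n, 1 ≤ f n) :
    pvTrimTail (pvFlatR (pvSetFirst f rl)) = pvFlatR (pvSetLast (fun _ => 1) (pvSetFirst f rl)) :=
  pvTrimTail_flat _ (pvGood_setFirst f hf rl h)

-- ===== VERDICT (by name: the statement is the Claim_ definition above) =====
theorem corregir_palabra_spec : Claim_equal_corregir_palabra := by
  intro palabra _
  unfold Spec_corregir_palabra corregir_palabra corregir_palabra_alt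
  dsimp only
  rw [pvFoldl_rstep, pvLoopA_eq]
  have hcoll : (fun p : Char × Nat => if PySem.Chars.isalpha p.1 then (p.1, min 2 p.2) else p)
      = pvCollapseP := rfl
  rw [hcoll]
  set l := palabra.toList with hl
  set rl := (pvRunsOf l).map pvCollapseP with hrl
  have hgood : pvGood rl := pvGood_map_collapse _ (pvRunsOf_good l)
  by_cases hw : PySem.Chars.startswith l ['w','w','w'] = true
  · -- URL case: the word starts with 'www'
    rw [if_pos hw, if_pos hw, if_neg (by simp [hw])]
    obtain ⟨t, ht⟩ := (PySem.Chars.startswith_iff (s := l) (p := ['w','w','w'])).mp hw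
    have hlw : l = 'w' :: 'w' :: 'w' :: t := by rw [← ht]; rfl
    obtain ⟨m, rs, h1, hm⟩ := pvRunsOf_head 'w' t
    have h3 : pvRunsOf l = ('w', m + 1 + 1) :: rs := by
      rw [hlw]
      exact pvRunsOf_cons_same _ _ _ _ (pvRunsOf_cons_same _ _ _ _ h1)
    have hrl2 : rl = ('w', 2) :: rs.map pvCollapseP := by
      rw [hrl, h3]
      have halpha : PySem.Chars.isalpha 'w' = true := by decide
      simp [pvCollapseP, halpha]
    have hpre : 'w' :: pvFlatR rl = pvFlatR (pvSetFirst (· + 1) rl) := by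
      rw [hrl2]
      simp [pvSetFirst, pvFlatR, List.replicate]
    rw [hpre, pvGood_setLast_flat rl hgood _ (fun n => by omega)]
    rfl
  · rw [if_neg hw, if_neg hw]
    by_cases hll : PySem.Chars.startswith l ['l','l'] = true
    · rw [if_neg (by simp [hll]), if_neg (by simp [hll])]
      rw [pvTrimTail_flat rl hgood]
      rfl
    · rw [if_pos ⟨by simp [hll], by simp [hw]⟩, if_pos (by simp [hll])]
      rw [pvTrimLead_flat rl hgood, pvGood_setLast_flat rl hgood _ (fun n => by omega)]
      rfl
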